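-- pv_equiv track=rewrite | github.com/dattito/ml-journey | tokenizer_from_scratch/tokenizer.py | split_sub
-- ===== SOURCE A (Python) =====
-- def split_sub(t: list[str], sep: str) -> list[str]:
--     res = []
--     for e in t:
--         n = e.split(sep)
--         if len(n) == 1:
--             res += n
--         else:
--             for f in n:
--                 if f != "":
--                     res.append(f)
--                 res.append(sep)
--             res.pop()
--
--     return res
-- ===== SOURCE B (Python) =====
-- def _scan(e: str, sep: str) -> list[str]:
--     # Single left-to-right scan: at each position, if the separator starts here,
--     # flush the pending piece (if non-empty) and emit the separator; otherwise
--     # grow the pending piece.  Flush the tail piece at the end.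
--     out = []
--     cur = ""
--     i = 0
--     while i < len(e):
--         if e.startswith(sep, i):
--             if cur:
--                 out.append(cur)
--             out.append(sep)
--             cur = ""
--             i += len(sep)
--         else:
--             cur += e[i]
--             i += 1
--     if cur:
--         out.append(cur)
--     return out
--
--
-- def split_sub(t: list[str], sep: str) -> list[str]:
--     res = []
--     for e in t:
--         if e == "":
--             res.append(e)
--         else:
--             res.extend(_scan(e, sep))
--     return res
-- ===== Notes on version B (the rewrite author's own statement) =====
-- stated objective: alternative
-- what changed: Instead of splitting each element and interleaving pieces with the separator then popping the trailing one, B makes a single left-to-right character scan per element (startswith at each position) that emits non-empty pieces and separators directly, with no split, no interleave and no pop.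
-- outside the precondition, e.g. on split_sub([], ''): A returns [], B returns []
import Mathlib
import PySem

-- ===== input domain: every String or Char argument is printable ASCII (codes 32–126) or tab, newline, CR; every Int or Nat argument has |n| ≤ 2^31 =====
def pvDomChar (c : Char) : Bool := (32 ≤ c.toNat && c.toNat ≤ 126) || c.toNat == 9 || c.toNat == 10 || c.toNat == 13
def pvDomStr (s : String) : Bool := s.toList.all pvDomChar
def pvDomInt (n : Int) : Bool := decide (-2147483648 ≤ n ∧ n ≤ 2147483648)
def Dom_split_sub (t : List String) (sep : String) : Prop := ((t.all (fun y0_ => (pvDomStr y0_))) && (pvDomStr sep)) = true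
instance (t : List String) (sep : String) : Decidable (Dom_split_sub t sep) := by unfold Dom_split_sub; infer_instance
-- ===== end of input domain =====

-- B replaces A's split-then-interleave-and-pop construction by a direct left-to-right
-- character scan that emits non-empty pieces and separators as it finds them — alternative algorithm, same cost.


-- ===== PORT A =====
def split_sub (t : List String) (sep : String) : List String :=
  t.foldl (fun res e =>
    match PySem.Str.split? e sep with
    | none => res      -- e.split("") raises ValueError; excluded by Pre_split_sub
    | some n =>
      if n.length = 1 then res ++ n
      else
        -- inner loop: append each non-empty piece, append sep after every piece
        let res2 := n.foldl (fun r f => (if f != "" then r ++ [f] else r) ++ [sep]) res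
        -- res.pop(): res2 ends with sep here, so it is nonempty and pop = dropLast (exact)
        res2.dropLast) []

-- ===== PORT B =====
-- the while loop of _scan, fuel-guarded (the loop only fails to terminate for sep = "",
-- which Pre_split_sub excludes); cur is the pending piece, emitted tokens are produced in order
def pvScanGo (sep : List Char) : Nat → List Char → List Char → List (List Char)
  | 0, _, _ => []
  | fuel + 1, l, cur =>
    match l with
    | [] => if cur.isEmpty then [] else [cur]             -- loop exit + final flush of cur
    | c :: rest =>
      if sep.isPrefixOf (c :: rest) then
        (if cur.isEmpty then [] else [cur]) ++ sep :: pvScanGo sep fuel ((c :: rest).drop sep.length) []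
      else pvScanGo sep fuel rest (cur ++ [c])

def split_sub_alt (t : List String) (sep : String) : List String :=
  t.flatMap (fun e =>
    if e = "" then [e]
    else (pvScanGo sep.toList (e.toList.length + 1) e.toList []).map String.ofList)

-- ===== PRECONDITION & SPEC =====
-- Pre_ excludes the empty separator, on which str.split raises ValueError for every element;
-- A returns there only for t = [] (both programs return [] on that vacuous input).
def Pre_split_sub (t : List String) (sep : String) : Prop := sep ≠ ""
instance (t : List String) (sep : String) : Decidable (Pre_split_sub t sep) := by unfold Pre_split_sub; infer_instance
def pvWitness_split_sub : List String × String := (["a,b", "c", ",,x"], ",")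

def Spec_split_sub (t : List String) (sep : String) (out : List String) : Prop := out = split_sub_alt t sep
instance (t : List String) (sep : String) (out : List String) : Decidable (Spec_split_sub t sep out) := by unfold Spec_split_sub; infer_instance

-- ===== CLAIM (what is proved, stated in full; the proofs are below) =====
def Claim_equal_split_sub : Prop := ∀ (t : List String) (sep : String), Dom_split_sub t sep → Pre_split_sub t sep → Spec_split_sub t sep (split_sub t sep)

-- ===== LEMMAS AND PROOFS =====

-- pieces of str.split, mirroring PySem.Chars.splitOn.go with forward accumulators
def pvPieces (sep : List Char) : Nat → List Char → List Char → List (List Char)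
  | 0, l, cur => [cur ++ l]
  | _ + 1, [], cur => [cur]
  | fuel + 1, c :: rest, cur =>
    if sep.isPrefixOf (c :: rest) then cur :: pvPieces sep fuel ((c :: rest).drop sep.length) []
    else pvPieces sep fuel rest (cur ++ [c])

-- tokens B emits for a piece list: non-empty pieces interleaved with sep
def pvInterp (sep : List Char) : List (List Char) → List (List Char)
  | [] => []
  | [p] => if p.isEmpty then [] else [p]
  | p :: ps => (if p.isEmpty then [] else [p]) ++ sep :: pvInterp sep ps

def pvInterpS (sep : String) : List String → List String
  | [] => []
  | [p] => if p = "" then [] else [p]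
  | p :: ps => (if p = "" then [] else [p]) ++ sep :: pvInterpS sep ps

-- the per-piece contribution of A's inner loop
def pvPieceL (sep : String) (n : List String) : List String :=
  n.flatMap (fun f => (if f != "" then [f] else []) ++ [sep])

lemma pvFoldl_inner (sep : String) : ∀ (n : List String) (res : List String),
    n.foldl (fun r f => (if f != "" then r ++ [f] else r) ++ [sep]) res = res ++ pvPieceL sep n := by
  intro n
  induction n with
  | nil => intro res; simp [pvPieceL]
  | cons f t ih =>
    intro res
    simp only [List.foldl_cons, ih, pvPieceL, List.flatMap_cons]
    by_cases h : f = "" <;> simp [h]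

lemma pvPieceL_ne_nil (sep : String) (f : String) (t : List String) : pvPieceL sep (f :: t) ≠ [] := by
  simp only [pvPieceL, List.flatMap_cons]
  intro h
  rcases List.append_eq_nil_iff.mp h with ⟨h1, _⟩
  rcases List.append_eq_nil_iff.mp h1 with ⟨_, h3⟩
  exact List.cons_ne_nil _ _ h3

-- A's interleave-then-pop per element is exactly B's token list pvInterpS
lemma pvPieceL_dropLast (sep : String) : ∀ (n : List String), n ≠ [] →
    (pvPieceL sep n).dropLast = pvInterpS sep n := by
  intro n
  induction n with
  | nil => intro h; exact absurd rfl h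
  | cons f t ih =>
    intro _
    cases t with
    | nil =>
      simp only [pvPieceL, List.flatMap_cons, List.flatMap_nil, List.append_nil, pvInterpS]
      by_cases h : f = "" <;> simp [h]
    | cons g u =>
      have hne := pvPieceL_ne_nil sep g u
      have hsplit : pvPieceL sep (f :: g :: u)
          = ((if f != "" then [f] else []) ++ [sep]) ++ pvPieceL sep (g :: u) := by
        simp [pvPieceL]
      rw [hsplit, List.dropLast_append_of_ne_nil hne, ih (by simp)]
      by_cases h : f = "" <;> simp [h, pvInterpS]

-- splitOn.go = pvPieces (forward form)
lemma pvGo_eq_pieces (sep : List Char) : ∀ (fuel : Nat) (l cur : List Char) (acc : List (List Char)),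
    PySem.Chars.splitOn.go sep fuel l cur acc = acc.reverse ++ pvPieces sep fuel l cur.reverse := by
  intro fuel
  induction fuel with
  | zero => intro l cur acc; rw [PySem.Chars.splitOn.go.eq_def]; simp [pvPieces]
  | succ m ih =>
    intro l cur acc
    cases l with
    | nil => rw [PySem.Chars.splitOn.go.eq_def]; simp [pvPieces]
    | cons c rest =>
      rw [PySem.Chars.splitOn.go.eq_def]
      simp only [pvPieces]
      by_cases h : sep.isPrefixOf (c :: rest) = true
      · simp only [h, if_true, ih]
        simp
      · simp only [h, if_false, Bool.false_eq_true, ih]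
        simp

lemma pvSplitOn_eq (l sep : List Char) :
    PySem.Chars.splitOn l sep = pvPieces sep (l.length + 1) l [] := by
  unfold PySem.Chars.splitOn
  simpa using pvGo_eq_pieces sep (l.length + 1) l [] []

lemma pvPieces_ne_nil (sep : List Char) : ∀ (fuel : Nat) (l cur : List Char),
    pvPieces sep fuel l cur ≠ [] := by
  intro fuel
  induction fuel with
  | zero => intro l cur; simp [pvPieces]
  | succ m ih =>
    intro l cur
    cases l with
    | nil => simp [pvPieces]
    | cons c rest =>
      simp only [pvPieces]
      by_cases h : sep.isPrefixOf (c :: rest) = true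
      · simp [h]
      · simp [h, ih]

-- a single piece means no separator occurrence: the piece is the whole input
lemma pvPieces_len_one (sep : List Char) : ∀ (fuel : Nat) (l cur : List Char),
    (pvPieces sep fuel l cur).length = 1 → pvPieces sep fuel l cur = [cur ++ l] := by
  intro fuel
  induction fuel with
  | zero => intro l cur _; rfl
  | succ m ih =>
    intro l cur hlen
    cases l with
    | nil => simp [pvPieces]
    | cons c rest =>
      simp only [pvPieces] at hlen ⊢
      by_cases h : sep.isPrefixOf (c :: rest) = true
      · exfalso
        simp only [h, if_true, List.length_cons] at hlen
        have := pvPieces_ne_nil sep m ((c :: rest).drop sep.length) []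
        cases hp : pvPieces sep m ((c :: rest).drop sep.length) [] with
        | nil => exact this hp
        | cons a b => rw [hp] at hlen; simp at hlen
      · simp only [h, Bool.false_eq_true, if_false] at hlen ⊢
        rw [ih rest (cur ++ [c]) hlen]
        simp
  -- B's scan produces exactly the interleaved non-empty pieces
lemma pvScan_eq_interp (sep : List Char) (hsep : sep ≠ []) :
    ∀ (fuel : Nat) (l cur : List Char), l.length < fuel →
    pvScanGo sep fuel l cur = pvInterp sep (pvPieces sep fuel l cur) := by
  intro fuel
  induction fuel with
  | zero => intro l cur h; omega
  | succ m ih =>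
    intro l cur hlt
    cases l with
    | nil =>
      simp [pvScanGo, pvPieces, pvInterp]
    | cons c rest =>
      simp only [pvScanGo, pvPieces]
      by_cases h : sep.isPrefixOf (c :: rest) = true
      · simp only [h, if_true]
        have hd : ((c :: rest).drop sep.length).length < m := by
          have h1 : 1 ≤ sep.length := by
            cases sep with
            | nil => exact absurd rfl hsep
            | cons _ _ => simp
          simp only [List.length_drop, List.length_cons] at *
          omega
        rw [ih _ _ hd]
        cases hp : pvPieces sep m ((c :: rest).drop sep.length) [] with
        | nil => exact absurd hp (pvPieces_ne_nil sep m _ [])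
        | cons a b =>
          simp [pvInterp]
      · simp only [h, Bool.false_eq_true, if_false]
        exact ih rest (cur ++ [c]) (by simp at hlt ⊢; omega)

-- mapping String.ofList over pvInterp gives pvInterpS
lemma pvInterp_map (sep : List Char) : ∀ (ps : List (List Char)),
    (pvInterp sep ps).map String.ofList = pvInterpS (String.ofList sep) (ps.map String.ofList) := by
  intro ps
  induction ps with
  | nil => simp [pvInterp, pvInterpS]
  | cons p t ih =>
    cases t with
    | nil =>
      simp only [pvInterp, pvInterpS, List.map_cons, List.map_nil]
      by_cases h : p.isEmpty
      · have : String.ofList p = "" := by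
          cases p
          · rfl
          · simp at h
        simp [h, this]
      · have hne : ¬ String.ofList p = "" := by
          cases p with
          | nil => simp at h
          | cons a b =>
            intro hc
            have := congrArg String.toList hc
            simp at this
        simp [h, hne]
    | cons g u =>
      have hi : pvInterp sep (p :: g :: u)
          = (if p.isEmpty then [] else [p]) ++ sep :: pvInterp sep (g :: u) := rfl
      have hiS : pvInterpS (String.ofList sep) (String.ofList p :: String.ofList g :: u.map String.ofList)
          = (if String.ofList p = "" then [] else [String.ofList p])
            ++ String.ofList sep :: pvInterpS (String.ofList sep) (String.ofList g :: u.map String.ofList) := rfl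
      simp only [hi, List.map_append, List.map_cons, hiS, ih]
      by_cases h : p.isEmpty
      · have : String.ofList p = "" := by
          cases p
          · rfl
          · simp at h
        simp [h, this]
      · have hne : ¬ String.ofList p = "" := by
          cases p with
          | nil => simp at h
          | cons a b =>
            intro hc
            have := congrArg String.toList hc
            simp at this
        simp [h, hne]

-- the piece list of a 1-piece split of e is [e]
lemma pvSplit?_eq (e sep : String) (hsep : sep ≠ "") :
    PySem.Str.split? e sep
      = some ((pvPieces sep.toList (e.toList.length + 1) e.toList []).map String.ofList) := by
  unfold PySem.Str.split? PySem.Chars.split?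
  have hs : sep.toList.isEmpty = false := by
    simp only [List.isEmpty_eq_false_iff, ne_eq, String.toList_eq_nil_iff]
    exact hsep
  simp [hs, pvSplitOn_eq]

-- per-element: A's step equals appending B's token list
lemma pvStep (sep : String) (hsep : sep ≠ "") (res : List String) (e : String) :
    (match PySem.Str.split? e sep with
     | none => res
     | some n =>
       if n.length = 1 then res ++ n
       else (n.foldl (fun r f => (if f != "" then r ++ [f] else r) ++ [sep]) res).dropLast) =
    res ++ (if e = "" then [e]
            else (pvScanGo sep.toList (e.toList.length + 1) e.toList []).map String.ofList) := by
  have hsepL : sep.toList ≠ [] := by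
    simp only [ne_eq, String.toList_eq_nil_iff]; exact hsep
  rw [pvSplit?_eq e sep hsep]
  set ps := pvPieces sep.toList (e.toList.length + 1) e.toList [] with hps
  have hBne : ∀ _ : e ≠ "",
      (pvScanGo sep.toList (e.toList.length + 1) e.toList []).map String.ofList
        = pvInterpS sep (ps.map String.ofList) := by
    intro _
    rw [pvScan_eq_interp sep.toList hsepL (e.toList.length + 1) e.toList [] (by omega),
        pvInterp_map, ← hps]
    congr 1
    exact String.ofList_toList
  by_cases he : e = ""
  · -- e = "": the split has the single piece [], A appends [""], B appends [e]
    subst he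
    have hps1 : ps = [[]] := by rw [hps]; rfl
    simp [hps1]
  · simp only [he, if_false]
    rw [hBne he]
    by_cases hlen : (ps.map String.ofList).length = 1
    · -- single piece: it is the whole (non-empty) string e
      have hlen' : ps.length = 1 := by simpa using hlen
      have hone : ps = [e.toList] := by
        have := pvPieces_len_one sep.toList (e.toList.length + 1) e.toList [] hlen'
        rw [← hps] at this
        simpa using this
      have heL : ¬ e.toList = [] := by
        simp only [String.toList_eq_nil_iff]; exact he
      simp only [hone, List.map_cons, List.map_nil, String.ofList_toList]
      simp [pvInterpS, he]
    · simp only [hlen, if_false]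
      have hmne : ps.map String.ofList ≠ [] := by
        intro hnil
        exact pvPieces_ne_nil sep.toList _ _ _ (by simpa using hnil)
      have hpne : pvPieceL sep (ps.map String.ofList) ≠ [] := by
        cases hp : ps.map String.ofList with
        | nil => exact absurd hp hmne
        | cons a b => exact pvPieceL_ne_nil sep a b
      rw [pvFoldl_inner, List.dropLast_append_of_ne_nil hpne, pvPieceL_dropLast sep _ hmne]

-- ===== VERDICT (by name: the statement is the Claim_ definition above) =====
theorem split_sub_spec : Claim_equal_split_sub := by
  intro t sep hdom hpre
  clear hdom
  unfold Pre_split_sub at hpre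
  unfold Spec_split_sub split_sub split_sub_alt
  induction t using List.reverseRecOn with
  | nil => rfl
  | append_singleton ts e ih =>
    rw [List.foldl_append, ih, List.flatMap_append]
    simp only [List.foldl_cons, List.foldl_nil, List.flatMap_cons, List.flatMap_nil, List.append_nil]
    exact pvStep sep hpre _ e
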